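-- pv_equiv track=rewrite | github.com/PranavKumar9529desai/BitTorrent-Client | piece_manager.py | is_piece_complete
-- ===== SOURCE A (Python) =====
-- def is_piece_complete(pieces_dict, piece_index, expected_piece_length):
--     """
--     Checks if a piece is complete (has all blocks).
--
--     Args:
--         pieces_dict: dict - {piece_index: {offset: data}}
--         piece_index: int - Index of piece to check
--         expected_piece_length: int - Expected total length of piece
--
--     Returns:
--         bool - True if piece is complete
--     """
--     if piece_index not in pieces_dict:
--         return False
--
--     blocks = pieces_dict[piece_index]
--     if not blocks:
--         return False
--
--     # Calculate total size of received blocks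
--     total_size = sum(len(data) for data in blocks.values())
--
--     # Check if we have the expected size (allow small difference for last piece)
--     if total_size < expected_piece_length - 100:  # Allow 100 bytes tolerance
--         return False
--
--     # Check if blocks are sequential (no gaps)
--     sorted_offsets = sorted(blocks.keys())
--     expected_offset = 0
--
--     for offset in sorted_offsets:
--         if offset != expected_offset:
--             return False  # Gap in blocks
--         expected_offset += len(blocks[offset])
--
--     return True
-- ===== SOURCE B (Python) =====
-- def is_piece_complete(pieces_dict, piece_index, expected_piece_length):
--     blocks = pieces_dict.get(piece_index)
--     if not blocks:
--         return False
--     # Follow the chain of contiguous blocks from offset 0, counting blocks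
--     # and accumulating the covered length; no sorting needed.
--     pos = 0
--     count = 0
--     while pos in blocks:
--         data = blocks[pos]
--         count += 1
--         if len(data) == 0:
--             break
--         pos += len(data)
--     return count == len(blocks) and pos >= expected_piece_length - 100
-- ===== Notes on version B (the rewrite author's own statement) =====
-- stated objective: alternative
-- what changed: Replaced the sum-then-sort-then-scan contiguity check with a single chain-following walk from offset 0 (pos += len(block), counting visited blocks), so the total covered length and contiguity are checked in one pass without sorting.
import Mathlib
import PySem

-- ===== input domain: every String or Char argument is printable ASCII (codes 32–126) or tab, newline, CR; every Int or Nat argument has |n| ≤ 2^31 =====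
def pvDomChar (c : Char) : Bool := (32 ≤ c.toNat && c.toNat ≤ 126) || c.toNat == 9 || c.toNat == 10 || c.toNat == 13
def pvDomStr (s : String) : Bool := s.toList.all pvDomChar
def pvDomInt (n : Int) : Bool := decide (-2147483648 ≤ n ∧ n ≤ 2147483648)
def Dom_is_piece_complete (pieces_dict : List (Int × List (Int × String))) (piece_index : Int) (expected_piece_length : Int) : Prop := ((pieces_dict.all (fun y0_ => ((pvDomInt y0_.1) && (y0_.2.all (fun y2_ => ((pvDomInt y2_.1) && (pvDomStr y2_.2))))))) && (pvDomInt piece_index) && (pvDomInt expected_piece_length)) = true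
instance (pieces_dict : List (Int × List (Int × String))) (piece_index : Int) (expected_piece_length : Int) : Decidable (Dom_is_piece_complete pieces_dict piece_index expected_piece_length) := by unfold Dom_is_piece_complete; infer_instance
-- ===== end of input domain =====

-- B replaces A's sum-then-sort-then-scan check by a single chain-following walk
-- from offset 0 that checks contiguity and covered length together; objective: alternative.

-- ===== PORT A =====
-- the 'for offset in sorted_offsets' loop (early return on a gap)
def pvScanA (blocks : PySem.Dict Int String) : List Int → Int → Bool
  | [], _ => true
  | o :: rest, exp =>
      if o ≠ exp then false
      else pvScanA blocks rest (exp + PySem.Str.len (blocks.getD o ""))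

def is_piece_complete (pieces_dict : List (Int × List (Int × String))) (piece_index : Int) (expected_piece_length : Int) : Bool :=
  let d := PySem.Dict.ofList pieces_dict
  if d.contains piece_index = false then false
  else
    -- 'pieces_dict[piece_index]': the containment check just succeeded, so get? is some
    let blocks := PySem.Dict.ofList ((d.get? piece_index).getD [])
    if blocks.size = 0 then false
    else
      let total := (blocks.values.map (fun data => PySem.Str.len data)).sum
      if total < expected_piece_length - 100 then false
      else pvScanA blocks (PySem.List.sorted blocks.keys (fun x => x) false) 0

-- ===== PORT B =====
-- the 'while pos in blocks' chain walk; fuel = blocks.size (each iteration that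
-- finds a key consumes a distinct key, so blocks.size iterations always suffice)
def pvWalkB (blocks : PySem.Dict Int String) : Nat → Int → Int → Int × Int
  | 0, pos, count => (pos, count)
  | fuel + 1, pos, count =>
      match blocks.get? pos with
      | none => (pos, count)
      | some data =>
          if PySem.Str.len data = 0 then (pos, count + 1)
          else pvWalkB blocks fuel (pos + PySem.Str.len data) (count + 1)

def is_piece_complete_alt (pieces_dict : List (Int × List (Int × String))) (piece_index : Int) (expected_piece_length : Int) : Bool :=
  match (PySem.Dict.ofList pieces_dict).get? piece_index with
  | none => false
  | some bl =>
      let blocks := PySem.Dict.ofList bl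
      if blocks.size = 0 then false
      else
        let r := pvWalkB blocks blocks.size 0 0
        decide (r.2 = (blocks.size : Int)) && decide (r.1 ≥ expected_piece_length - 100)

-- ===== PRECONDITION & SPEC =====
def Spec_is_piece_complete (pieces_dict : List (Int × List (Int × String))) (piece_index : Int) (expected_piece_length : Int) (out : Bool) : Prop := out = is_piece_complete_alt pieces_dict piece_index expected_piece_length
instance (pieces_dict : List (Int × List (Int × String))) (piece_index : Int) (expected_piece_length : Int) (out : Bool) : Decidable (Spec_is_piece_complete pieces_dict piece_index expected_piece_length out) := by unfold Spec_is_piece_complete; infer_instance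

-- ===== CLAIM (what is proved, stated in full; the proofs are below) =====
def Claim_equal_is_piece_complete : Prop := ∀ (pieces_dict : List (Int × List (Int × String))) (piece_index : Int) (expected_piece_length : Int), Dom_is_piece_complete pieces_dict piece_index expected_piece_length → Spec_is_piece_complete pieces_dict piece_index expected_piece_length (is_piece_complete pieces_dict piece_index expected_piece_length)

-- ===== LEMMAS AND PROOFS =====

theorem pvWalkB_succ_none (blocks : PySem.Dict Int String) (f : Nat) (pos count : Int)
    (hg : blocks.get? pos = none) : pvWalkB blocks (f + 1) pos count = (pos, count) := by
  simp only [pvWalkB]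
  rw [hg]

theorem pvWalkB_succ_some (blocks : PySem.Dict Int String) (f : Nat) (pos count : Int)
    (data : String) (hg : blocks.get? pos = some data) :
    pvWalkB blocks (f + 1) pos count
      = if PySem.Str.len data = 0 then (pos, count + 1)
        else pvWalkB blocks f (pos + PySem.Str.len data) (count + 1) := by
  simp only [pvWalkB]
  rw [hg]

theorem pvStrLen_nonneg (s : String) : 0 ≤ PySem.Str.len s := by
  simp [PySem.Str.len_eq]

-- The walk's count grows by at most the number of still-reachable keys:
-- any Nodup list S containing every key at or beyond pos bounds it.
theorem pvWalkB_count_le (blocks : PySem.Dict Int String) :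
    ∀ (fuel : Nat) (pos count : Int) (S : List Int), S.Nodup →
      (∀ k, (blocks.get? k).isSome = true → pos ≤ k → k ∈ S) →
      (pvWalkB blocks fuel pos count).2 ≤ count + S.length := by
  intro fuel
  induction fuel with
  | zero =>
    intro pos count S _ _
    simp only [pvWalkB]
    have : (0:Int) ≤ S.length := by positivity
    omega
  | succ f ih =>
    intro pos count S hS hmem
    cases hg : blocks.get? pos with
    | none =>
      rw [pvWalkB_succ_none blocks f pos count hg]
      have : (0:Int) ≤ S.length := by positivity
      omega
    | some data =>
      rw [pvWalkB_succ_some blocks f pos count data hg]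
      have hpos : pos ∈ S := hmem pos (by rw [hg]; rfl) le_rfl
      have hlenS : 0 < S.length := List.length_pos_of_mem hpos
      by_cases hl : PySem.Str.len data = 0
      · rw [if_pos hl]
        simp only
        omega
      · rw [if_neg hl]
        have hlt : 0 < PySem.Str.len data :=
          lt_of_le_of_ne (pvStrLen_nonneg data) (Ne.symm hl)
        have h1 := ih (pos + PySem.Str.len data) (count + 1) (S.erase pos)
          (hS.erase pos)
          (by
            intro k hk hge
            have hkS : k ∈ S := hmem k hk (by omega)
            exact (List.mem_erase_of_ne (by omega)).mpr hkS)
        have h2 : (S.erase pos).length = S.length - 1 := List.length_erase_of_mem hpos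
        omega

-- Main invariant: if rest lists, strictly increasingly, exactly the keys at or
-- beyond pos, then A's scan succeeds iff B's walk consumes all of rest, and then
-- the walk's final position is pos plus the total length of the listed blocks.
theorem pvWalk_scan (blocks : PySem.Dict Int String) :
    ∀ (rest : List Int) (pos count : Int) (fuel : Nat),
      rest.Pairwise (· < ·) →
      (∀ k, (blocks.get? k).isSome = true → pos ≤ k → k ∈ rest) →
      (∀ k ∈ rest, (blocks.get? k).isSome = true) →
      rest.length ≤ fuel →
      (if pvScanA blocks rest pos = true
       then pvWalkB blocks fuel pos count =
              (pos + (rest.map (fun k => PySem.Str.len (blocks.getD k ""))).sum,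
               count + rest.length)
       else (pvWalkB blocks fuel pos count).2 < count + rest.length) := by
  intro rest
  induction rest with
  | nil =>
    intro pos count fuel _ h2 _ _
    have hnone : blocks.get? pos = none := by
      cases hg : blocks.get? pos with
      | none => rfl
      | some d => exact absurd (h2 pos (by rw [hg]; rfl) le_rfl) (List.not_mem_nil)
    rw [if_pos (by simp [pvScanA])]
    simp only [List.map_nil, List.sum_nil, List.length_nil]
    cases fuel with
    | zero => simp [pvWalkB]
    | succ f =>
      rw [pvWalkB_succ_none blocks f pos count hnone]
      simp
  | cons o t ih =>
    intro pos count fuel hpw h2 h3 hfuel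
    obtain ⟨f, rfl⟩ : ∃ f, fuel = f + 1 :=
      ⟨fuel - 1, by simp only [List.length_cons] at hfuel; omega⟩
    have hoSome := h3 o List.mem_cons_self
    by_cases hop : o = pos
    · subst hop
      obtain ⟨data, hg⟩ : ∃ d, blocks.get? o = some d := by
        cases hgg : blocks.get? o with
        | none => rw [hgg] at hoSome; simp at hoSome
        | some d => exact ⟨d, rfl⟩
      have hgetD : blocks.getD o "" = data := PySem.Dict.getD_of_get?_eq_some blocks "" hg
      by_cases hl : PySem.Str.len data = 0
      · -- empty block: B breaks; A passes only when this is the last block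
        cases t with
        | nil =>
          rw [if_pos (by simp [pvScanA])]
          rw [pvWalkB_succ_some blocks f o count data hg, if_pos hl]
          simp only [List.map_cons, List.map_nil, List.sum_cons, List.sum_nil, hgetD,
            List.length_cons, List.length_nil, Prod.mk.injEq]
          constructor
          · omega
          · push_cast
            ring
        | cons h t' =>
          have hoh : o < h := (List.pairwise_cons.mp hpw).1 h List.mem_cons_self
          have hscan : pvScanA blocks (o :: h :: t') o = false := by
            simp only [pvScanA, hgetD, hl]
            rw [if_neg (by omega : ¬ o ≠ o), if_pos (by omega : h ≠ o + 0)]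
          rw [if_neg (by simp [hscan])]
          rw [pvWalkB_succ_some blocks f o count data hg, if_pos hl]
          simp only [List.length_cons]
          push_cast
          omega
      · have hlt : 0 < PySem.Str.len data :=
          lt_of_le_of_ne (pvStrLen_nonneg data) (Ne.symm hl)
        have hstep : pvWalkB blocks (f + 1) o count
            = pvWalkB blocks f (o + PySem.Str.len data) (count + 1) := by
          rw [pvWalkB_succ_some blocks f o count data hg, if_neg hl]
        have hscan : pvScanA blocks (o :: t) o
            = pvScanA blocks t (o + PySem.Str.len data) := by
          simp only [pvScanA, hgetD]
          rw [if_neg (by omega : ¬ o ≠ o)]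
        cases t with
        | nil =>
          rw [if_pos (show pvScanA blocks [o] o = true from hscan.trans rfl), hstep]
          have hnone : blocks.get? (o + PySem.Str.len data) = none := by
            cases hgg : blocks.get? (o + PySem.Str.len data) with
            | none => rfl
            | some d =>
              have := h2 (o + PySem.Str.len data) (by rw [hgg]; rfl) (by omega)
              simp only [List.mem_singleton] at this
              omega
          have hwalk : pvWalkB blocks f (o + PySem.Str.len data) (count + 1)
              = (o + PySem.Str.len data, count + 1) := by
            cases f with
            | zero => simp [pvWalkB]
            | succ f' => rw [pvWalkB_succ_none blocks f' _ _ hnone]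
          rw [hwalk]
          simp only [List.map_cons, List.map_nil, List.sum_cons, List.sum_nil,
            List.length_cons, List.length_nil, hgetD, Prod.mk.injEq]
          constructor <;> push_cast <;> ring
        | cons h t' =>
          have hoh : o < h := (List.pairwise_cons.mp hpw).1 h List.mem_cons_self
          by_cases hle : o + PySem.Str.len data ≤ h
          · -- the tail is again exactly the keys at or beyond the new position
            have hmain := ih (o + PySem.Str.len data) (count + 1) f
              (List.pairwise_cons.mp hpw).2
              (by
                intro k hk hge
                have hk' := h2 k hk (by omega)
                rcases List.mem_cons.mp hk' with hk' | hk'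
                · omega
                · exact hk')
              (by intro k hk; exact h3 k (List.mem_cons_of_mem o hk))
              (by simp only [List.length_cons] at hfuel ⊢; omega)
            cases hs : pvScanA blocks (h :: t') (o + PySem.Str.len data) with
            | true =>
              rw [hs, if_pos rfl] at hmain
              rw [if_pos (hscan.trans hs), hstep, hmain]
              simp only [List.map_cons, List.sum_cons, List.length_cons, hgetD,
                Prod.mk.injEq]
              constructor <;> push_cast <;> ring
            | false =>
              rw [hs] at hmain
              rw [if_neg (by simp) ] at hmain
              rw [if_neg (by rw [hscan, hs]; simp), hstep]
              simp only [List.length_cons] at hmain ⊢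
              push_cast at hmain ⊢
              omega
          · -- the next key sits inside the current block: A fails, B strands it
            have hscanF : pvScanA blocks (h :: t') (o + PySem.Str.len data) = false := by
              simp only [pvScanA]
              rw [if_pos (by omega : h ≠ o + PySem.Str.len data)]
            rw [if_neg (by rw [hscan, hscanF]; simp), hstep]
            have htpw := (List.pairwise_cons.mp hpw).2
            have ht'pw := (List.pairwise_cons.mp htpw).2
            have hbound := pvWalkB_count_le blocks f (o + PySem.Str.len data) (count + 1) t'
              (ht'pw.imp (fun hab => ne_of_lt hab))
              (by
                intro k hk hge
                have hk' := h2 k hk (by omega)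
                rcases List.mem_cons.mp hk' with hk' | hk'
                · omega
                rcases List.mem_cons.mp hk' with hk' | hk'
                · omega
                · exact hk')
            simp only [List.length_cons]
            push_cast at hbound ⊢
            omega
    · -- head is not the current position: A fails at once; B cannot reach o
      have hscan : pvScanA blocks (o :: t) pos = false := by
        simp only [pvScanA]
        rw [if_pos (by omega : o ≠ pos)]
      rw [if_neg (by simp [hscan])]
      simp only [List.length_cons]
      cases hg : blocks.get? pos with
      | none =>
        rw [pvWalkB_succ_none blocks f pos count hg]
        have : (0:Int) ≤ t.length := by positivity
        push_cast
        omega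
      | some data =>
        have hposmem : pos ∈ o :: t := h2 pos (by rw [hg]; rfl) le_rfl
        have hpost : pos ∈ t := by
          rcases List.mem_cons.mp hposmem with hh | hh
          · exact absurd hh.symm hop
          · exact hh
        have hopos : o < pos := (List.pairwise_cons.mp hpw).1 pos hpost
        have htpw := (List.pairwise_cons.mp hpw).2
        have hbound := pvWalkB_count_le blocks (f + 1) pos count t
          (htpw.imp (fun hab => ne_of_lt hab))
          (by
            intro k hk hge
            have hk' := h2 k hk (by omega)
            rcases List.mem_cons.mp hk' with hk' | hk'
            · omega
            · exact hk')
        push_cast at hbound ⊢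
        omega

-- A's total (over values) equals the scan-order total (over sorted keys).
theorem pvSum_sorted_keys (blocks : PySem.Dict Int String) (hnd : blocks.keys.Nodup) :
    ((PySem.List.sorted blocks.keys (fun x => x) false).map
        (fun k => PySem.Str.len (blocks.getD k ""))).sum
      = (blocks.values.map (fun data => PySem.Str.len data)).sum := by
  have hperm : (PySem.List.sorted blocks.keys (fun x => x) false).Perm blocks.keys :=
    PySem.List.sorted_perm blocks.keys _ false
  rw [(hperm.map (fun k => PySem.Str.len (blocks.getD k ""))).sum_eq]
  have hkeys : blocks.keys.map (fun k => PySem.Str.len (blocks.getD k ""))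
      = blocks.values.map (fun data => PySem.Str.len data) := by
    show (blocks.items.map Prod.fst).map _ = (blocks.items.map Prod.snd).map _
    rw [List.map_map, List.map_map]
    refine List.map_congr_left ?_
    intro p hp
    simp only [Function.comp]
    rw [PySem.Dict.getD_of_mem_items blocks (k := p.1) (v := p.2) (by simpa using hp) hnd ""]
  rw [hkeys]

-- Both ports, specialised to a common nonempty block dict.
theorem pvCore (blocks : PySem.Dict Int String) (hnd : blocks.keys.Nodup) (epl : Int) :
    (if (blocks.values.map (fun data => PySem.Str.len data)).sum < epl - 100 then false
     else pvScanA blocks (PySem.List.sorted blocks.keys (fun x => x) false) 0)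
    = (decide ((pvWalkB blocks blocks.size 0 0).2 = (blocks.size : Int)) &&
       decide ((pvWalkB blocks blocks.size 0 0).1 ≥ epl - 100)) := by
  have hpw : (PySem.List.sorted blocks.keys (fun x => x) false).Pairwise (· < ·) := by
    have h1 : (PySem.List.sorted blocks.keys (fun x => x) false).Pairwise (· ≤ ·) :=
      PySem.List.sorted_pairwise blocks.keys _
    have h2 : (PySem.List.sorted blocks.keys (fun x => x) false).Nodup :=
      (PySem.List.sorted_perm blocks.keys _ false).nodup_iff.mpr hnd
    exact (h1.and h2).imp (fun hab => lt_of_le_of_ne hab.1 hab.2)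
  have hlen : (PySem.List.sorted blocks.keys (fun x => x) false).length = blocks.size := by
    rw [PySem.List.length_sorted blocks.keys _ false]
    show (blocks.items.map Prod.fst).length = blocks.items.length
    simp
  have hmain := pvWalk_scan blocks (PySem.List.sorted blocks.keys (fun x => x) false) 0 0
    blocks.size hpw
    (by
      intro k hk _
      refine (PySem.List.mem_sorted blocks.keys _ false k).mpr ?_
      by_contra hmem
      rw [(PySem.Dict.get?_eq_none_iff_not_mem_keys blocks k).mpr hmem] at hk
      simp at hk)
    (by
      intro k hk
      have hmem : k ∈ blocks.keys := (PySem.List.mem_sorted blocks.keys _ false k).mp hk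
      cases hgg : blocks.get? k with
      | none => exact absurd ((PySem.Dict.get?_eq_none_iff_not_mem_keys blocks k).mp hgg) (by simp [hmem])
      | some v => simp
    )
    (le_of_eq hlen)
  cases hscan : pvScanA blocks (PySem.List.sorted blocks.keys (fun x => x) false) 0 with
  | false =>
    rw [hscan, if_neg (by simp)] at hmain
    have hne : (pvWalkB blocks blocks.size 0 0).2 ≠ (blocks.size : Int) := by
      rw [hlen] at hmain
      omega
    simp [hne]
  | true =>
    rw [hscan, if_pos rfl] at hmain
    have hw1 : (pvWalkB blocks blocks.size 0 0).1
        = (blocks.values.map (fun data => PySem.Str.len data)).sum := by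
      rw [hmain]
      simpa using pvSum_sorted_keys blocks hnd
    have hw2 : (pvWalkB blocks blocks.size 0 0).2 = (blocks.size : Int) := by
      rw [hmain, hlen]
      simp
    by_cases hc : (blocks.values.map (fun data => PySem.Str.len data)).sum < epl - 100
    · rw [if_pos hc]
      have hlt2 : ¬ ((pvWalkB blocks blocks.size 0 0).1 ≥ epl - 100) := by
        rw [hw1]
        omega
      simp [hlt2]
    · rw [if_neg hc]
      have hge2 : (pvWalkB blocks blocks.size 0 0).1 ≥ epl - 100 := by
        rw [hw1]
        omega
      simp [hw2, hge2]

-- ===== VERDICT (by name: the statement is the Claim_ definition above) =====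
theorem is_piece_complete_spec : Claim_equal_is_piece_complete := by
  intro pieces_dict piece_index expected_piece_length _
  unfold Spec_is_piece_complete is_piece_complete is_piece_complete_alt
  cases hg : (PySem.Dict.ofList pieces_dict).get? piece_index with
  | none =>
    have hc : (PySem.Dict.ofList pieces_dict).contains piece_index = false := by
      rw [PySem.Dict.contains_eq_isSome_get? .., hg]
      rfl
    simp [hc]
  | some bl =>
    have hc : (PySem.Dict.ofList pieces_dict).contains piece_index = true := by
      rw [PySem.Dict.contains_eq_isSome_get? .., hg]
      rfl
    simp only [hc, hg, Option.getD_some, Bool.true_eq_false, if_false]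
    by_cases hsz : (PySem.Dict.ofList bl).size = 0
    · simp [hsz]
    · simp only [if_neg hsz]
      exact pvCore (PySem.Dict.ofList bl) (PySem.Dict.nodup_keys_ofList ..) expected_piece_length
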